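-- pv_equiv track=rewrite | github.com/giovi321/log-triage | logtriage/webui/regex_utils.py | _lint_regex_input
-- ===== SOURCE A (Python) =====
-- from typing import Any, Dict, List, Optional
--
-- def _lint_regex_input(regex_value: str) -> List[str]:
--     issues: List[str] = []
--     raw = regex_value or ""
--     if not raw.strip():
--         issues.append("Pattern cannot be empty.")
--
--     if raw.rstrip().endswith("/"):
--         issues.append(r"Trailing slash detected; remove it or escape as \\/.")
--
--     pairs = {"[": "]", "(": ")", "{": "}"}
--     opening = set(pairs)
--     closing = {v: k for k, v in pairs.items()}
--     stack: List[str] = []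
--     escaped = False
--     for ch in raw:
--         if escaped:
--             escaped = False
--             continue
--         if ch == "\\":
--             escaped = True
--             continue
--         if ch in opening:
--             stack.append(ch)
--         elif ch in closing:
--             if not stack or stack[-1] != closing[ch]:
--                 issues.append(f"Unbalanced bracket near '{ch}'.")
--                 break
--             stack.pop()
--     if stack:
--         issues.append("Unbalanced brackets detected.")
--
--     return issues
-- ===== SOURCE B (Python) =====
-- from typing import List
--
-- _PAIRS = {"[": "]", "(": ")", "{": "}"}
-- _CLOSERS = {"]", ")", "}"}
--
--
-- def _match(chars: List[str], i: int, close: str):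
--     """Consume chars[i:] expecting the closer `close` (recursive descent on nesting).
--     Returns ('ok', j) with j just past the matching closer, ('bad', ch) on the first
--     mismatched closer, or ('unclosed', None) if the input ends first."""
--     while i < len(chars):
--         ch = chars[i]
--         if ch in _PAIRS:
--             r = _match(chars, i + 1, _PAIRS[ch])
--             if r[0] != "ok":
--                 return r
--             i = r[1]
--         elif ch == close:
--             return ("ok", i + 1)
--         elif ch in _CLOSERS:
--             return ("bad", ch)
--         else:
--             i += 1
--     return ("unclosed", None)
--
--
-- def _scan(chars: List[str]) -> List[str]:
--     """Bracket diagnostics for an escape-free character list."""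
--     i = 0
--     while i < len(chars):
--         ch = chars[i]
--         if ch in _PAIRS:
--             r = _match(chars, i + 1, _PAIRS[ch])
--             if r[0] == "bad":
--                 return [f"Unbalanced bracket near '{r[1]}'.",
--                         "Unbalanced brackets detected."]
--             if r[0] == "unclosed":
--                 return ["Unbalanced brackets detected."]
--             i = r[1]
--         elif ch in _CLOSERS:
--             return [f"Unbalanced bracket near '{ch}'."]
--         else:
--             i += 1
--     return []
--
--
-- def _lint_regex_input(regex_value: str) -> List[str]:
--     raw = regex_value or ""
--     issues = ([] if raw.strip() else ["Pattern cannot be empty."]) + \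
--         ([r"Trailing slash detected; remove it or escape as \\/."]
--          if raw.rstrip().endswith("/") else [])
--
--     # Drop every backslash together with the character it escapes.
--     cleaned: List[str] = []
--     i = 0
--     while i < len(raw):
--         if raw[i] == "\\":
--             i += 2
--         else:
--             cleaned.append(raw[i])
--             i += 1
--
--     return issues + _scan(cleaned)
-- ===== Notes on version B (the rewrite author's own statement) =====
-- stated objective: alternative
-- what changed: B replaces A's single flag-and-stack loop by a staged pipeline: one pass drops each backslash with its escaped character, then a recursive-descent matcher (recursion on bracket nesting, no explicit stack) produces the bracket diagnostics directly as a message list.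
import Mathlib
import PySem

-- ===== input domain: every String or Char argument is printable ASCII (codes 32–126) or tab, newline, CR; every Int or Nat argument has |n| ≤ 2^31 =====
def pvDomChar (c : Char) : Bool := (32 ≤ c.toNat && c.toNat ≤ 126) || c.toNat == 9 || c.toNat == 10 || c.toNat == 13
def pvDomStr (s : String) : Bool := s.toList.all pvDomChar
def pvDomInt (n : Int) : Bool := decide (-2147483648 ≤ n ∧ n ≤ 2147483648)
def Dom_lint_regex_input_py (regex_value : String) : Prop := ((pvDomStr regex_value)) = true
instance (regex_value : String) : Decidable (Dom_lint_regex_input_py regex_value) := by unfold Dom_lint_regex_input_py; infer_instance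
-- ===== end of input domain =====

-- B replaces A's escaped-flag stack automaton by a staged pipeline: strip escape pairs, then a
-- recursive-descent matcher on the bracket nesting structure (no explicit stack) yields the messages.

-- ===== PORT A =====
-- A's single for-loop over raw with the 'escaped' boolean flag and the explicit bracket stack;
-- returns (stack, issues) as at loop exit (break = early return).
def pvLoopA : List Char → List Char → Bool → List String → (List Char × List String)
  | [], stack, _, issues => (stack, issues)
  | ch :: rest, stack, escaped, issues =>
    if escaped then pvLoopA rest stack false issues
    else if ch = '\\' then pvLoopA rest stack true issues
    else if ch = '[' ∨ ch = '(' ∨ ch = '{' then pvLoopA rest (stack ++ [ch]) false issues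
    else if ch = ']' ∨ ch = ')' ∨ ch = '}' then
      let opener : Char := if ch = ']' then '[' else if ch = ')' then '(' else '{'
      if stack = [] ∨ stack.getLast? ≠ some opener then
        (stack, issues ++ ["Unbalanced bracket near '" ++ String.singleton ch ++ "'."])  -- break
      else pvLoopA rest stack.dropLast false issues
    else pvLoopA rest stack false issues

def lint_regex_input_py (regex_value : String) : List String :=
  let raw := if regex_value = "" then "" else regex_value          -- regex_value or ""
  let issues : List String :=
    if PySem.Str.strip raw = "" then ["Pattern cannot be empty."] else []
  let issues :=
    if PySem.Str.endswith (PySem.Str.rstrip raw) "/" = true then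
      issues ++ ["Trailing slash detected; remove it or escape as \\\\/."] else issues
  let r := pvLoopA raw.toList [] false issues
  if r.1 ≠ [] then r.2 ++ ["Unbalanced brackets detected."] else r.2

-- ===== PORT B =====
-- B stage 1: drop each backslash together with the character it escapes (trailing lone backslash dropped).
def pvFilterEsc : List Char → List Char
  | [] => []
  | c :: rest =>
    if c = '\\' then
      match rest with
      | [] => []
      | _ :: r => pvFilterEsc r
    else c :: pvFilterEsc rest

-- the closer paired with an opener (Source B's _PAIRS lookup)
def pvCloserOf (c : Char) : Char := if c = '[' then ']' else if c = '(' then ')' else '}'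

-- outcome of Source B's _match when it does not return ('ok', j)
inductive PvMOut where
  | bad : Char → PvMOut
  | unclosed : PvMOut
deriving DecidableEq, Repr

-- B stage 2a: Source B's _match — recursive descent expecting closer `close`; the position i becomes the
-- remaining suffix, ('ok', j) becomes .inr (the suffix past the matching closer, with its length bound).
def pvMatch (close : Char) : (cs : List Char) → PvMOut ⊕ {r : List Char // r.length < cs.length}
  | [] => .inl .unclosed
  | c :: rest =>
    if c = '[' ∨ c = '(' ∨ c = '{' then
      match pvMatch (pvCloserOf c) rest with
      | .inl o => .inl o
      | .inr ⟨rem, hrem⟩ =>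
        match pvMatch close rem with
        | .inl o => .inl o
        | .inr ⟨rem2, h2⟩ => .inr ⟨rem2, by simp; omega⟩
    else if c = close then .inr ⟨rest, by simp⟩
    else if c = ']' ∨ c = ')' ∨ c = '}' then .inl (.bad c)
    else
      match pvMatch close rest with
      | .inl o => .inl o
      | .inr ⟨rem, h⟩ => .inr ⟨rem, by simp; omega⟩
termination_by cs => cs.length
decreasing_by all_goals (simp; try omega)

-- B stage 2b: Source B's _scan — the bracket diagnostics of an escape-free character list.
def pvScan : (cs : List Char) → List String
  | [] => []
  | c :: rest =>
    if c = '[' ∨ c = '(' ∨ c = '{' then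
      match pvMatch (pvCloserOf c) rest with
      | .inl (.bad ch) =>
          ["Unbalanced bracket near '" ++ String.singleton ch ++ "'.",
           "Unbalanced brackets detected."]
      | .inl .unclosed => ["Unbalanced brackets detected."]
      | .inr ⟨rem, _⟩ => pvScan rem
    else if c = ']' ∨ c = ')' ∨ c = '}' then
      ["Unbalanced bracket near '" ++ String.singleton c ++ "'."]
    else pvScan rest
termination_by cs => cs.length
decreasing_by all_goals (simp; try omega)

def lint_regex_input_py_alt (regex_value : String) : List String :=
  let raw := regex_value          -- 'regex_value or ""' is the identity on a str argument
  (if PySem.Str.strip raw = "" then ["Pattern cannot be empty."] else []) ++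
  (if PySem.Str.endswith (PySem.Str.rstrip raw) "/" = true then
      ["Trailing slash detected; remove it or escape as \\\\/."] else []) ++
  pvScan (pvFilterEsc raw.toList)

-- ===== PRECONDITION & SPEC =====
def Spec_lint_regex_input_py (regex_value : String) (out : List String) : Prop := out = lint_regex_input_py_alt regex_value
instance (regex_value : String) (out : List String) : Decidable (Spec_lint_regex_input_py regex_value out) := by unfold Spec_lint_regex_input_py; infer_instance

-- ===== CLAIM (what is proved, stated in full; the proofs are below) =====
def Claim_equal_lint_regex_input_py : Prop := ∀ (regex_value : String), Dom_lint_regex_input_py regex_value → Spec_lint_regex_input_py regex_value (lint_regex_input_py regex_value)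

-- ===== LEMMAS AND PROOFS =====

-- Proof-side bridge: A's loop with the escape flag already resolved, i.e. the plain stack automaton.
def pvStk : List Char → List Char → List String → (List Char × List String)
  | [], stack, issues => (stack, issues)
  | ch :: rest, stack, issues =>
    if ch = '[' ∨ ch = '(' ∨ ch = '{' then pvStk rest (stack ++ [ch]) issues
    else if ch = ']' ∨ ch = ')' ∨ ch = '}' then
      let opener : Char := if ch = ']' then '[' else if ch = ')' then '(' else '{'
      if stack = [] ∨ stack.getLast? ≠ some opener then
        (stack, issues ++ ["Unbalanced bracket near '" ++ String.singleton ch ++ "'."])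
      else pvStk rest stack.dropLast issues
    else pvStk rest stack issues

theorem pvLoopA_eq_pvStk (cs : List Char) :
    ∀ stack issues, pvLoopA cs stack false issues = pvStk (pvFilterEsc cs) stack issues := by
  induction cs using pvFilterEsc.induct with
  | case1 => intro stack issues; simp [pvLoopA, pvFilterEsc, pvStk]
  | case2 => intro stack issues; simp [pvLoopA, pvFilterEsc, pvStk]
  | case3 x r ih => intro stack issues; simp only [pvLoopA, pvFilterEsc]; simp [ih]
  | case4 c rest hc ih =>
    intro stack issues
    have hfe : pvFilterEsc (c :: rest) = c :: pvFilterEsc rest := by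
      rw [pvFilterEsc.eq_def]; simp [hc]
    rw [hfe]
    simp only [pvLoopA, pvStk, Bool.false_eq_true, if_false, if_neg hc]
    split_ifs <;> simp [ih]

def pvNear (c : Char) : String := "Unbalanced bracket near '" ++ String.singleton c ++ "'."


-- inner invariant: running A's stack automaton with top opener o is governed by Source B's _match (pvMatch)
theorem pvStk_pvMatch : ∀ (n : Nat) (cs : List Char), cs.length ≤ n →
    ∀ (o : Char), (o = '[' ∨ o = '(' ∨ o = '{') → ∀ (base : List Char) (issues : List String),
    (∀ rem (h : rem.length < cs.length), pvMatch (pvCloserOf o) cs = .inr ⟨rem, h⟩ →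
        pvStk cs (base ++ [o]) issues = pvStk rem base issues) ∧
    (∀ c, pvMatch (pvCloserOf o) cs = .inl (.bad c) →
        ∃ s, pvStk cs (base ++ [o]) issues = (s, issues ++ [pvNear c]) ∧ s ≠ []) ∧
    (pvMatch (pvCloserOf o) cs = .inl .unclosed →
        ∃ s, pvStk cs (base ++ [o]) issues = (s, issues) ∧ s ≠ []) := by
  intro n
  induction n with
  | zero =>
    intro cs hcs o ho base issues
    have : cs = [] := List.eq_nil_of_length_eq_zero (Nat.le_zero.mp hcs)
    subst this
    refine ⟨?_, ?_, ?_⟩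
    · intro rem h hEq; simp [pvMatch] at hEq
    · intro c hEq; simp [pvMatch] at hEq
    · intro _; exact ⟨base ++ [o], by simp [pvStk], by simp⟩
  | succ n ih =>
    intro cs hcs o ho base issues
    rcases cs with _ | ⟨c, rest⟩
    · refine ⟨?_, ?_, ?_⟩
      · intro rem h hEq; simp [pvMatch] at hEq
      · intro ch hEq; simp [pvMatch] at hEq
      · intro _; exact ⟨base ++ [o], by simp [pvStk], by simp⟩
    · have hrest : rest.length ≤ n := by simp at hcs; omega
      by_cases hc : c = '[' ∨ c = '(' ∨ c = '{'
      · -- c is an opener: push on the stack side, nested descent on the match side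
        have hstk : pvStk (c :: rest) (base ++ [o]) issues
            = pvStk rest ((base ++ [o]) ++ [c]) issues := by
          rw [pvStk.eq_def]; simp [hc]
        obtain ⟨ih1c, ih2c, ih3c⟩ := ih rest hrest c hc (base ++ [o]) issues
        rcases hm : pvMatch (pvCloserOf c) rest with mo | ⟨rem, hrem⟩
        · have houter : pvMatch (pvCloserOf o) (c :: rest) = .inl mo := by
            rw [pvMatch.eq_def]; simp [hc, hm]
          refine ⟨?_, ?_, ?_⟩
          · intro rem h hEq; rw [houter] at hEq; exact absurd hEq (by simp)
          · intro ch hEq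
            rw [houter] at hEq
            obtain rfl : mo = PvMOut.bad ch := by simpa using hEq
            obtain ⟨s, hs, hne⟩ := ih2c ch hm
            exact ⟨s, by rw [hstk, hs], hne⟩
          · intro hEq
            rw [houter] at hEq
            obtain rfl : mo = PvMOut.unclosed := by simpa using hEq
            obtain ⟨s, hs, hne⟩ := ih3c hm
            exact ⟨s, by rw [hstk, hs], hne⟩
        · -- inner bracket closed, continue at rem with the outer expectation
          have hpop : pvStk (c :: rest) (base ++ [o]) issues = pvStk rem (base ++ [o]) issues := by
            rw [hstk, ih1c rem hrem hm]
          have hrem' : rem.length ≤ n := by simp at hcs; omega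
          obtain ⟨j1, j2, j3⟩ := ih rem hrem' o ho base issues
          rcases hm2 : pvMatch (pvCloserOf o) rem with mo2 | ⟨rem2, h2⟩
          · have houter : pvMatch (pvCloserOf o) (c :: rest) = .inl mo2 := by
              rw [pvMatch.eq_def]; simp [hc, hm, hm2]
            refine ⟨?_, ?_, ?_⟩
            · intro rem' h hEq; rw [houter] at hEq; exact absurd hEq (by simp)
            · intro ch hEq
              rw [houter] at hEq
              obtain rfl : mo2 = PvMOut.bad ch := by simpa using hEq
              obtain ⟨s, hs, hne⟩ := j2 ch hm2
              exact ⟨s, by rw [hpop, hs], hne⟩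
            · intro hEq
              rw [houter] at hEq
              obtain rfl : mo2 = PvMOut.unclosed := by simpa using hEq
              obtain ⟨s, hs, hne⟩ := j3 hm2
              exact ⟨s, by rw [hpop, hs], hne⟩
          · have houter : ∃ hp, pvMatch (pvCloserOf o) (c :: rest) = .inr ⟨rem2, hp⟩ := by
              refine ⟨?_, ?_⟩
              · simp; omega
              · rw [pvMatch.eq_def]; simp [hc, hm, hm2]
            obtain ⟨hp, houter⟩ := houter
            refine ⟨?_, ?_, ?_⟩
            · intro rem' h hEq
              rw [houter] at hEq
              obtain rfl : rem2 = rem' := by simpa using hEq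
              rw [hpop, j1 rem2 h2 hm2]
            · intro ch hEq; rw [houter] at hEq; exact absurd hEq (by simp)
            · intro hEq; rw [houter] at hEq; exact absurd hEq (by simp)
      · by_cases hcl : c = pvCloserOf o
        · -- the matching closer: pop on the stack side, ok on the match side
          have houter : pvMatch (pvCloserOf o) (c :: rest)
              = .inr ⟨rest, by simp⟩ := by
            rcases ho with rfl | rfl | rfl <;> subst hcl <;>
              (rw [pvMatch.eq_def]; simp [pvCloserOf])
          have hpop : pvStk (c :: rest) (base ++ [o]) issues = pvStk rest base issues := by
            rcases ho with rfl | rfl | rfl <;> subst hcl <;>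
              · rw [pvStk.eq_def]
                simp [pvCloserOf]
          refine ⟨?_, ?_, ?_⟩
          · intro rem' h hEq
            rw [houter] at hEq
            obtain rfl : rest = rem' := by simpa using hEq
            exact hpop
          · intro ch hEq; rw [houter] at hEq; exact absurd hEq (by simp)
          · intro hEq; rw [houter] at hEq; exact absurd hEq (by simp)
        · by_cases hc2 : c = ']' ∨ c = ')' ∨ c = '}'
          · -- a mismatched closer: break on the stack side, bad on the match side
            have houter : pvMatch (pvCloserOf o) (c :: rest) = .inl (.bad c) := by
              rw [pvMatch.eq_def]; simp [hc, hcl, hc2]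
            have hbrk : pvStk (c :: rest) (base ++ [o]) issues
                = (base ++ [o], issues ++ [pvNear c]) := by
              rcases ho with rfl | rfl | rfl <;> rcases hc2 with rfl | rfl | rfl <;>
                first
                | (exact absurd rfl hcl)
                | (rw [pvStk.eq_def]
                   simp [pvCloserOf, pvNear] at hcl ⊢)
            refine ⟨?_, ?_, ?_⟩
            · intro rem' h hEq; rw [houter] at hEq; exact absurd hEq (by simp)
            · intro ch hEq
              rw [houter] at hEq
              obtain rfl : c = ch := by simpa using hEq
              exact ⟨base ++ [o], hbrk, by simp⟩
            · intro hEq; rw [houter] at hEq; exact absurd hEq (by simp)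
          · -- an ordinary character: both sides skip it
            have hskip : pvStk (c :: rest) (base ++ [o]) issues
                = pvStk rest (base ++ [o]) issues := by
              rw [pvStk.eq_def]; simp [hc, hc2]
            obtain ⟨j1, j2, j3⟩ := ih rest hrest o ho base issues
            rcases hm : pvMatch (pvCloserOf o) rest with mo | ⟨rem, hrem⟩
            · have houter : pvMatch (pvCloserOf o) (c :: rest) = .inl mo := by
                rw [pvMatch.eq_def]; simp [hc, hcl, hc2, hm]
              refine ⟨?_, ?_, ?_⟩
              · intro rem' h hEq; rw [houter] at hEq; exact absurd hEq (by simp)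
              · intro ch hEq
                rw [houter] at hEq
                obtain rfl : mo = PvMOut.bad ch := by simpa using hEq
                obtain ⟨s, hs, hne⟩ := j2 ch hm
                exact ⟨s, by rw [hskip, hs], hne⟩
              · intro hEq
                rw [houter] at hEq
                obtain rfl : mo = PvMOut.unclosed := by simpa using hEq
                obtain ⟨s, hs, hne⟩ := j3 hm
                exact ⟨s, by rw [hskip, hs], hne⟩
            · have houter : ∃ hp, pvMatch (pvCloserOf o) (c :: rest) = .inr ⟨rem, hp⟩ := by
                refine ⟨by simp; omega, ?_⟩
                rw [pvMatch.eq_def]; simp [hc, hcl, hc2, hm]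
              obtain ⟨hp, houter⟩ := houter
              refine ⟨?_, ?_, ?_⟩
              · intro rem' h hEq
                rw [houter] at hEq
                obtain rfl : rem = rem' := by simpa using hEq
                rw [hskip, j1 rem hrem hm]
              · intro ch hEq; rw [houter] at hEq; exact absurd hEq (by simp)
              · intro hEq; rw [houter] at hEq; exact absurd hEq (by simp)


-- top level: A's stack automaton plus the final stack check produce exactly Source B's _scan messages
theorem pvStk_pvScan : ∀ (n : Nat) (cs : List Char), cs.length ≤ n → ∀ (issues : List String),
    (if (pvStk cs [] issues).1 ≠ [] then (pvStk cs [] issues).2 ++ ["Unbalanced brackets detected."]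
     else (pvStk cs [] issues).2) = issues ++ pvScan cs := by
  intro n
  induction n with
  | zero =>
    intro cs hcs issues
    have : cs = [] := List.eq_nil_of_length_eq_zero (Nat.le_zero.mp hcs)
    subst this; simp [pvStk, pvScan]
  | succ n ih =>
    intro cs hcs issues
    rcases cs with _ | ⟨c, rest⟩
    · simp [pvStk, pvScan]
    · have hrest : rest.length ≤ n := by simp at hcs; omega
      by_cases hc : c = '[' ∨ c = '(' ∨ c = '{'
      · have hstk : pvStk (c :: rest) [] issues = pvStk rest ([] ++ [c]) issues := by
          rw [pvStk.eq_def]; simp [hc]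
        obtain ⟨p1, p2, p3⟩ := pvStk_pvMatch rest.length rest le_rfl c hc [] issues
        rcases hm : pvMatch (pvCloserOf c) rest with mo | ⟨rem, hrem⟩
        · have hscan : pvScan (c :: rest) =
              (match mo with
               | PvMOut.bad ch => [pvNear ch, "Unbalanced brackets detected."]
               | PvMOut.unclosed => ["Unbalanced brackets detected."]) := by
            rw [pvScan.eq_def]; rcases mo with ch | _ <;> simp [hc, hm, pvNear]
          rcases mo with ch | _
          · obtain ⟨s, hs, hne⟩ := p2 ch hm
            rw [hstk, hs] at *
            simp [hne, hscan]
          · obtain ⟨s, hs, hne⟩ := p3 hm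
            rw [hstk, hs] at *
            simp [hne, hscan]
        · have hscan : pvScan (c :: rest) = pvScan rem := by
            rw [pvScan.eq_def]; simp [hc, hm]
          rw [hstk, p1 rem hrem hm, hscan]
          exact ih rem (by simp at hcs; omega) issues
      · by_cases hc2 : c = ']' ∨ c = ')' ∨ c = '}'
        · have hbrk : pvStk (c :: rest) [] issues = ([], issues ++ [pvNear c]) := by
            rw [pvStk.eq_def]; simp [hc, hc2, pvNear]
          have hscan : pvScan (c :: rest) = [pvNear c] := by
            rw [pvScan.eq_def]; simp [hc, hc2, pvNear]
          rw [hbrk, hscan]; simp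
        · have hskip : pvStk (c :: rest) [] issues = pvStk rest [] issues := by
            rw [pvStk.eq_def]; simp [hc, hc2]
          have hscan : pvScan (c :: rest) = pvScan rest := by
            rw [pvScan.eq_def]; simp [hc, hc2]
          rw [hskip, hscan]
          exact ih rest hrest issues

-- ===== VERDICT (by name: the statement is the Claim_ definition above) =====
theorem lint_regex_input_py_spec : Claim_equal_lint_regex_input_py := by
  intro regex_value _
  unfold Spec_lint_regex_input_py lint_regex_input_py lint_regex_input_py_alt
  have hraw : (if regex_value = "" then "" else regex_value) = regex_value := by
    split_ifs with h <;> simp [h]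
  simp only [hraw, pvLoopA_eq_pvStk]
  by_cases h1 : PySem.Str.strip regex_value = "" <;>
    by_cases h2 : PySem.Str.endswith (PySem.Str.rstrip regex_value) "/" = true <;>
      simp only [h1, h2, if_false, if_pos] <;>
        rw [pvStk_pvScan (pvFilterEsc regex_value.toList).length _ le_rfl] <;> simp
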